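-- pv_equiv track=rewrite | github.com/pratik2358/functional_dep_checker_online | utils.py | _bit_to_attrs
-- ===== SOURCE A (Python) =====
-- def _bit_to_attrs(bitmask, bit_to_attr):
--     """Inverse of _attr_bitmask."""
--     res = []
--     i = 0
--     while bitmask:
--         if bitmask & 1:
--             res.append(bit_to_attr[i])
--         bitmask >>= 1
--         i += 1
--     return res
-- ===== SOURCE B (Python) =====
-- def _bit_to_attrs(bitmask, bit_to_attr):
--     """Inverse of _attr_bitmask: iterate only over the set bits (Kernighan clear-lowest-bit)."""
--     res = []
--     while bitmask:
--         nxt = bitmask & (bitmask - 1)   # clear lowest set bit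
--         low = bitmask - nxt             # the lowest set bit itself (a power of two)
--         res.append(bit_to_attr[low.bit_length() - 1])
--         bitmask = nxt
--     return res
-- ===== Notes on version B (the rewrite author's own statement) =====
-- stated objective: faster
-- what changed: Instead of shifting the mask right one bit per iteration and testing every bit position, B loops only over the set bits, clearing the lowest set bit each round (bitmask & (bitmask-1)) and recovering its index with bit_length(), so it iterates popcount(bitmask) times instead of bit_length(bitmask) times.
import Mathlib
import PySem

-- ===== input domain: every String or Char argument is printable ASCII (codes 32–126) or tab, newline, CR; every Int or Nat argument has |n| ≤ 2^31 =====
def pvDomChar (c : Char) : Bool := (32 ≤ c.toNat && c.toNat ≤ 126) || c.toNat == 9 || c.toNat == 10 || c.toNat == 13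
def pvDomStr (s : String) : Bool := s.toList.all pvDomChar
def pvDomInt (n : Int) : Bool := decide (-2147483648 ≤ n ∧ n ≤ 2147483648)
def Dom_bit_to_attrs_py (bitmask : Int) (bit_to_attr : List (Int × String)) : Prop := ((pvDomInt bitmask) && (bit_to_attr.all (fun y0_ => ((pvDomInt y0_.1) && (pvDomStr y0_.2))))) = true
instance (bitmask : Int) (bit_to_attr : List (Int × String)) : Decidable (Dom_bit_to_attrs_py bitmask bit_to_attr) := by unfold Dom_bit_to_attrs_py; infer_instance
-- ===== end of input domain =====

-- B iterates only over the SET bits (clear-lowest-set-bit), A shifts through every bit position.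
-- Equivalence is about the RETURN value; Pre_ excludes the inputs on which the Python A does not
-- return (negative bitmask: infinite loop; a set bit whose index is missing from the dict: KeyError).

-- ===== PORT A =====
-- bit_to_attr[i]: Python dict lookup; Pre_ guarantees the key is present, so getD "" is never the
-- result on an admitted input.
def pvLookup (d : List (Int × String)) (k : Int) : String :=
  ((PySem.Dict.mk d).get? k).getD ""

-- the while loop of A: condition 'bitmask' (nonzero), test 'bitmask & 1', then 'bitmask >>= 1; i += 1'.
-- fuel makes the recursion structural; fuel = the mask itself always suffices (the mask strictly
-- shrinks each iteration), so the 0-fuel branch is unreachable from the wrapper.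
def goA (d : List (Int × String)) : Nat → Nat → Int → List String
  | 0, _, _ => []
  | fuel + 1, n, i =>
    if n = 0 then []
    else (if n % 2 = 1 then [pvLookup d i] else []) ++ goA d fuel (n / 2) (i + 1)

-- toNat is a totality guard only: on bitmask < 0 the Python A loops forever (excluded by Pre_)
def bit_to_attrs_py (bitmask : Int) (bit_to_attr : List (Int × String)) : List String :=
  goA bit_to_attr bitmask.toNat bitmask.toNat 0

-- ===== PORT B =====
-- the while loop of B: nxt = bitmask & (bitmask - 1); low = bitmask - nxt; index low.bit_length() - 1
def goB (d : List (Int × String)) : Nat → Nat → List String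
  | 0, _ => []
  | fuel + 1, n =>
    if n = 0 then []
    else
      let nxt := n &&& (n - 1)
      let low := n - nxt
      pvLookup d ((PySem.Int.bitLength (low : Int) : Int) - 1) :: goB d fuel nxt

-- toNat is the same totality guard as in port A (Python B also loops forever on bitmask < 0)
def bit_to_attrs_py_alt (bitmask : Int) (bit_to_attr : List (Int × String)) : List String :=
  goB bit_to_attr bitmask.toNat bitmask.toNat

-- ===== PRECONDITION & SPEC =====
-- Pre_ is exactly where the Python A returns: bitmask ≥ 0 (a negative mask never becomes 0 under
-- '>>= 1', so A loops forever) and every set bit's index present in the dict (else KeyError).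
def Pre_bit_to_attrs_py (bitmask : Int) (bit_to_attr : List (Int × String)) : Prop :=
  0 ≤ bitmask ∧
    ∀ i : Nat, i < PySem.Int.bitLength bitmask → bitmask.toNat.testBit i = true →
      ((PySem.Dict.mk bit_to_attr).get? (i : Int)).isSome = true

instance (bitmask : Int) (bit_to_attr : List (Int × String)) : Decidable (Pre_bit_to_attrs_py bitmask bit_to_attr) := by
  unfold Pre_bit_to_attrs_py; infer_instance

def pvWitness_bit_to_attrs_py : Int × (List (Int × String)) := (5, [(0, "a"), (1, "b"), (2, "c")])

def Spec_bit_to_attrs_py (bitmask : Int) (bit_to_attr : List (Int × String)) (out : List String) : Prop := out = bit_to_attrs_py_alt bitmask bit_to_attr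
instance (bitmask : Int) (bit_to_attr : List (Int × String)) (out : List String) : Decidable (Spec_bit_to_attrs_py bitmask bit_to_attr out) := by unfold Spec_bit_to_attrs_py; infer_instance

-- ===== CLAIM (what is proved, stated in full; the proofs are below) =====
def Claim_equal_bit_to_attrs_py : Prop := ∀ (bitmask : Int) (bit_to_attr : List (Int × String)), Dom_bit_to_attrs_py bitmask bit_to_attr → Pre_bit_to_attrs_py bitmask bit_to_attr → Spec_bit_to_attrs_py bitmask bit_to_attr (bit_to_attrs_py bitmask bit_to_attr)

-- ===== LEMMAS AND PROOFS =====

-- ascending list of the set-bit positions of n (the common characterisation of both loops)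
def posList (n : Nat) : List Nat :=
  if h : n = 0 then []
  else (if n % 2 = 1 then [0] else []) ++ (posList (n / 2)).map (· + 1)
termination_by n
decreasing_by exact Nat.div_lt_self (Nat.pos_of_ne_zero h) one_lt_two

lemma goA_char (d : List (Int × String)) :
    ∀ fuel n i, n ≤ fuel →
      goA d fuel n i = (posList n).map (fun (j : Nat) => pvLookup d (i + (j : Int))) := by
  intro fuel
  induction fuel with
  | zero => intro n i hn; interval_cases n; rw [posList]; rfl
  | succ fuel ih =>
    intro n i hn
    rw [goA, posList]
    by_cases h : n = 0
    · subst h; rfl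
    · simp only [h, dite_false]
      rw [ih (n / 2) (i + 1) (by omega)]
      have hmap : (posList (n / 2)).map (fun (j : Nat) => pvLookup d (i + 1 + (j : Int))) =
          (posList (n / 2)).map (fun (j : Nat) => pvLookup d (i + ((j : Int) + 1))) :=
        List.map_congr_left (fun a _ => by congr 1; ring)
      by_cases hp : n % 2 = 1 <;>
        simp [hp, hmap]

lemma and_pred_odd (n : Nat) (h : n % 2 = 1) : n &&& (n - 1) = n - 1 := by
  apply Nat.eq_of_testBit_eq
  intro i
  rw [Nat.testBit_and]
  cases i with
  | zero =>
    have h1 : (n - 1) % 2 = 0 := by omega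
    simp [Nat.testBit_zero, h1]
  | succ i =>
    have h2 : (n - 1) / 2 = n / 2 := by omega
    simp [Nat.testBit_succ, h2]

lemma and_pred_even (k : Nat) (h : 0 < k) : (2 * k) &&& (2 * k - 1) = 2 * (k &&& (k - 1)) := by
  apply Nat.eq_of_testBit_eq
  intro i
  rw [Nat.testBit_and]
  cases i with
  | zero =>
    have h1 : (2 * k) % 2 = 0 := by omega
    have h2 : (2 * (k &&& (k - 1))) % 2 = 0 := by omega
    simp [Nat.testBit_zero, h1]
  | succ i =>
    have h1 : (2 * k) / 2 = k := by omega
    have h2 : (2 * k - 1) / 2 = k - 1 := by omega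
    have h3 : (2 * (k &&& (k - 1))) / 2 = k &&& (k - 1) := by omega
    simp [Nat.testBit_succ, h1, h2, h3, Nat.testBit_and]

lemma posList_two_mul (m : Nat) : posList (2 * m) = (posList m).map (· + 1) := by
  by_cases h : m = 0
  · rw [posList]; simp [h, posList]
  · rw [posList]
    have h1 : ¬ (2 * m = 0) := by omega
    have h3 : (2 * m) / 2 = m := by omega
    simp [h1, h3, Nat.mul_mod_right]

lemma pvBitLength_two_mul (x : Nat) (hx : 0 < x) :
    PySem.Int.bitLength ((2 * x : Nat) : Int) = PySem.Int.bitLength (x : Int) + 1 := by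
  rw [PySem.Int.bitLength_natCast (by omega)]
  have h : 2 * x / 2 = x := by omega
  rw [h]

lemma pvBitLength_pos (x : Nat) (hx : 0 < x) : 1 ≤ PySem.Int.bitLength (x : Int) := by
  rw [PySem.Int.bitLength_natCast hx]
  omega

lemma posList_key (n : Nat) (h : 0 < n) :
    posList n = (PySem.Int.bitLength ((n - (n &&& (n - 1)) : Nat) : Int) - 1) :: posList (n &&& (n - 1)) := by
  induction n using Nat.strong_induction_on with
  | _ n ih =>
    by_cases hp : n % 2 = 1
    · -- odd: the lowest set bit is 1
      rw [and_pred_odd n hp]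
      have h1 : n - (n - 1) = 1 := by omega
      rw [h1]
      have hb : PySem.Int.bitLength ((1 : Nat) : Int) - 1 = 0 := by decide
      rw [hb, posList]
      simp only [show ¬ (n = 0) by omega, dite_false, hp, if_true]
      have h2 : n - 1 = 2 * (n / 2) := by omega
      rw [h2, posList_two_mul]
      rfl
    · -- even: n = 2k, recurse on k
      obtain ⟨k, hk⟩ : ∃ k, n = 2 * k := ⟨n / 2, by omega⟩
      subst hk
      have hkpos : 0 < k := by omega
      have hand : k &&& (k - 1) ≤ k - 1 := Nat.and_le_right
      rw [and_pred_even k hkpos]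
      have hlow : 2 * k - 2 * (k &&& (k - 1)) = 2 * (k - (k &&& (k - 1))) := by omega
      have hlowpos : 0 < k - (k &&& (k - 1)) := by omega
      have hb1 : 1 ≤ PySem.Int.bitLength ((k - (k &&& (k - 1)) : Nat) : Int) :=
        pvBitLength_pos _ hlowpos
      rw [hlow, pvBitLength_two_mul _ hlowpos, posList_two_mul, ih k (by omega) hkpos,
        posList_two_mul]
      simp only [List.map_cons]
      congr 1
      omega

lemma goB_char (d : List (Int × String)) :
    ∀ fuel n, n ≤ fuel →
      goB d fuel n = (posList n).map (fun (j : Nat) => pvLookup d (j : Int)) := by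
  intro fuel
  induction fuel with
  | zero => intro n hn; interval_cases n; rw [posList]; rfl
  | succ fuel ih =>
    intro n hn
    rw [goB]
    by_cases h : n = 0
    · subst h; rw [posList]; rfl
    · simp only [if_neg h]
      have hand : n &&& (n - 1) ≤ n - 1 := Nat.and_le_right
      have hlowpos : 0 < n - (n &&& (n - 1)) := by omega
      rw [posList_key n (Nat.pos_of_ne_zero h), ih (n &&& (n - 1)) (by omega)]
      simp only [List.map_cons]
      congr 2
      have hb1 : 1 ≤ PySem.Int.bitLength ((n - (n &&& (n - 1)) : Nat) : Int) :=
        pvBitLength_pos _ hlowpos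
      push_cast [Nat.cast_sub hb1]
      ring

-- ===== VERDICT (by name: the statement is the Claim_ definition above) =====
theorem bit_to_attrs_py_spec : Claim_equal_bit_to_attrs_py := by
  intro bitmask bit_to_attr _ _
  unfold Spec_bit_to_attrs_py bit_to_attrs_py bit_to_attrs_py_alt
  rw [goA_char _ _ _ _ le_rfl, goB_char _ _ _ le_rfl]
  simp only [zero_add]
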